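-- pv_equiv track=rewrite | github.com/anoubhav/Codeforces-Atcoder-Codechef-solutions | Codechef/COVIDLQ.py | is_social_distance
-- ===== SOURCE A (Python) =====
-- def is_social_distance(n, lst):
--     prev = -1
--     for i, num in enumerate(lst):
--         if num == 1:
--             if prev == -1:
--                 prev = i
--             else:
--                 if i<prev+6:
--                     return 'NO'
--                 else:
--                     prev = i
--
--     return 'YES'
-- ===== SOURCE B (Python) =====
-- def is_social_distance(n, lst):
--     for i, x in enumerate(lst):
--         if x == 1 and 1 in lst[i + 1:i + 6]:
--             return 'NO'
--     return 'YES'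
-- ===== Notes on version B (the rewrite author's own statement) =====
-- stated objective: alternative
-- what changed: Replaces A's stateful gap tracking (remember previous occupied index, compare i < prev+6) by a stateless local-window test: a seat violates distancing iff it is occupied and another occupied seat appears in the next five positions lst[i+1:i+6].
import Mathlib
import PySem

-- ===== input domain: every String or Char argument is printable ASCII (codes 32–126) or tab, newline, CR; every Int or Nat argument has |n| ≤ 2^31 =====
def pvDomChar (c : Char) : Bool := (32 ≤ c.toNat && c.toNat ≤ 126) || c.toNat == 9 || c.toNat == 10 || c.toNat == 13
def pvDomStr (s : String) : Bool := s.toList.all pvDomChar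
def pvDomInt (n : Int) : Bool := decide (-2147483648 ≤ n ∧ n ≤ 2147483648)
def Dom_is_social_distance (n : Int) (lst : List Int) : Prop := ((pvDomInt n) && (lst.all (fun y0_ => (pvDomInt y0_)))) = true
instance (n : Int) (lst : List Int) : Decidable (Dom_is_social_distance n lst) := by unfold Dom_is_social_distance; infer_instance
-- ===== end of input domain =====

-- B replaces A's stateful prev-gap tracking by a stateless per-seat lookahead: occupied seat with another occupied seat in the next five positions => 'NO' (alternative decomposition; return value only).


-- ===== PORT A =====
-- enumerate(lst) with Int indices starting at i
def pvEnumFrom (i : Int) : List Int → List (Int × Int)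
  | [] => []
  | x :: xs => (i, x) :: pvEnumFrom (i + 1) xs

-- A's loop: state prev, early return 'NO'
def pvLoopA (prev : Int) : List (Int × Int) → String
  | [] => "YES"
  | (i, num) :: rest =>
    if num == 1 then
      if prev == -1 then pvLoopA i rest
      else if i < prev + 6 then "NO"
      else pvLoopA i rest
    else pvLoopA prev rest

def is_social_distance (_n : Int) (lst : List Int) : String :=
  pvLoopA (-1) (pvEnumFrom 0 lst)

-- ===== PORT B =====
-- for i, x in enumerate(lst): if x == 1 and 1 in lst[i+1:i+6]: return 'NO'
def pvLoopB (lst : List Int) : List (Int × Int) → String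
  | [] => "YES"
  | (i, x) :: rest =>
    if x == 1 && (PySem.List.slice lst (some (i + 1)) (some (i + 6))).contains 1 then "NO"
    else pvLoopB lst rest

def is_social_distance_alt (_n : Int) (lst : List Int) : String :=
  pvLoopB lst (pvEnumFrom 0 lst)

-- ===== PRECONDITION & SPEC =====
def Spec_is_social_distance (n : Int) (lst : List Int) (out : String) : Prop := out = is_social_distance_alt n lst
instance (n : Int) (lst : List Int) (out : String) : Decidable (Spec_is_social_distance n lst out) := by unfold Spec_is_social_distance; infer_instance

-- ===== CLAIM (what is proved, stated in full; the proofs are below) =====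
def Claim_equal_is_social_distance : Prop := ∀ (n : Int) (lst : List Int), Dom_is_social_distance n lst → Spec_is_social_distance n lst (is_social_distance n lst)

-- ===== LEMMAS AND PROOFS =====

-- canonical predicate: some occupied seat has another occupied seat within the next five
def pvNear : List Int → Bool
  | [] => false
  | x :: xs => (x == 1 && (xs.take 5).contains 1) || pvNear xs

-- positions of ones (proof helper only)
def pvPosFrom (i : Int) : List Int → List Int
  | [] => []
  | x :: xs => if x == 1 then i :: pvPosFrom (i + 1) xs else pvPosFrom (i + 1) xs

def pvAnyClose : List Int → Bool
  | a :: b :: rest => (b - a < 6) || pvAnyClose (b :: rest)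
  | _ => false

def pvFirstLt (i b : Int) (xs : List Int) : Bool :=
  match pvPosFrom i xs with
  | [] => false
  | q :: _ => q < b

-- A's loop with a real previous position decides the gaps of p consed onto the positions.
theorem pvLoopA_ne (xs : List Int) : ∀ (i p : Int), 0 ≤ i → p ≠ -1 →
    pvLoopA p (pvEnumFrom i xs) = if pvAnyClose (p :: pvPosFrom i xs) then "NO" else "YES" := by
  induction xs with
  | nil => intro i p _ _; simp [pvEnumFrom, pvPosFrom, pvLoopA, pvAnyClose]
  | cons x xs ih =>
    intro i p hi hp
    by_cases hx : x = 1
    · by_cases hlt : i < p + 6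
      · simp [pvEnumFrom, pvPosFrom, pvLoopA, pvAnyClose, hx, hp, hlt, show i - p < 6 by omega]
      · have h6 : ¬ (i - p < 6) := by omega
        simp [pvEnumFrom, pvPosFrom, pvLoopA, pvAnyClose, hx, hp, hlt, h6,
          ih (i + 1) i (by omega) (by omega)]
    · simp [pvEnumFrom, pvPosFrom, pvLoopA, hx, ih (i + 1) p (by omega) hp]

-- From the -1 sentinel, A's loop decides the gap check on the positions.
theorem pvLoopA_start (xs : List Int) : ∀ (i : Int), 0 ≤ i →
    pvLoopA (-1) (pvEnumFrom i xs) = if pvAnyClose (pvPosFrom i xs) then "NO" else "YES" := by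
  induction xs with
  | nil => intro i _; simp [pvEnumFrom, pvPosFrom, pvLoopA, pvAnyClose]
  | cons x xs ih =>
    intro i hi
    by_cases hx : x = 1
    · have hne : i ≠ -1 := by omega
      simp [pvEnumFrom, pvPosFrom, pvLoopA, hx, pvLoopA_ne xs (i + 1) i (by omega) hne]
    · simp [pvEnumFrom, pvPosFrom, pvLoopA, hx, ih (i + 1) (by omega)]

-- no ones at all when the position list is empty
theorem pvPosFrom_nil (xs : List Int) : ∀ (i : Int), pvPosFrom i xs = [] → (1 : Int) ∉ xs := by
  induction xs with
  | nil => intro i _; simp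
  | cons x xs ih =>
    intro i h
    by_cases hx : x = 1
    · simp [pvPosFrom, hx] at h
    · simp [pvPosFrom, hx] at h
      simp [ih (i + 1) h]
      omega

theorem pvNear_false : ∀ (xs : List Int), (1 : Int) ∉ xs → pvNear xs = false := by
  intro xs
  induction xs with
  | nil => intro _; simp [pvNear]
  | cons x xs ih =>
    intro h
    simp at h
    simp [pvNear, ih h.2]
    exact fun _ hm => h.2 (List.mem_of_mem_take hm)

-- first position below a bound ⟺ a one within the first k seats
theorem pvFirstLt_ge (xs : List Int) : ∀ (i b : Int), b ≤ i → pvFirstLt i b xs = false := by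
  induction xs with
  | nil => intro i b _; simp [pvFirstLt, pvPosFrom]
  | cons x xs ih =>
    intro i b hb
    by_cases hx : x = 1
    · simp [pvFirstLt, pvPosFrom, hx]; omega
    · simpa [pvFirstLt, pvPosFrom, hx] using ih (i + 1) b (by omega)

theorem pvFirstLt_step (xs : List Int) (x : Int) (hx : ¬ x = 1) (i b : Int) :
    pvFirstLt i b (x :: xs) = pvFirstLt (i + 1) b xs := by
  unfold pvFirstLt
  rw [show pvPosFrom i (x :: xs) = pvPosFrom (i + 1) xs from by simp [pvPosFrom, hx]]

theorem take_contains_eq (xs : List Int) : ∀ (i : Int) (k : Nat),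
    (xs.take k).contains 1 = pvFirstLt i (i + k) xs := by
  induction xs with
  | nil => intro i k; simp [pvFirstLt, pvPosFrom]
  | cons x xs ih =>
    intro i k
    cases k with
    | zero =>
      by_cases hx : x = 1
      · simp [pvFirstLt, pvPosFrom, hx]
      · simp only [List.take_zero, Nat.cast_zero, add_zero, pvFirstLt_step xs x hx]
        simp [pvFirstLt_ge xs (i + 1) i (by omega)]
    | succ k' =>
      by_cases hx : x = 1
      · simp [pvFirstLt, pvPosFrom, hx]
      · rw [pvFirstLt_step xs x hx,
          show i + ((k' + 1 : Nat) : Int) = (i + 1) + (k' : Nat) by push_cast; ring,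
          ← ih (i + 1) k']
        have h1x : ¬ (1 : Int) = x := fun h => hx h.symm
        simp [h1x]

-- the gap check on positions is exactly the local-window predicate
theorem anyClose_eq_near (xs : List Int) : ∀ (i : Int),
    pvAnyClose (pvPosFrom i xs) = pvNear xs := by
  induction xs with
  | nil => intro i; simp [pvPosFrom, pvAnyClose, pvNear]
  | cons x xs ih =>
    intro i
    by_cases hx : x = 1
    · cases hP : pvPosFrom (i + 1) xs with
      | nil =>
        have hc := pvPosFrom_nil xs (i + 1) hP
        simp [pvPosFrom, pvAnyClose, pvNear, hx, hP, pvNear_false xs hc]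
        exact fun hm => hc (List.mem_of_mem_take hm)
      | cons q P' =>
        have h1 : ((1 : Int) ∈ List.take 5 xs) ↔ q < i + 6 := by
          have := take_contains_eq xs (i + 1) 5
          rw [show pvFirstLt (i + 1) (i + 1 + (5 : Nat)) xs = decide (q < i + 1 + (5 : Nat))
            from by unfold pvFirstLt; rw [hP]] at this
          simp at this
          rw [this]; constructor <;> (intro; push_cast at *; omega)
        have h2 : pvAnyClose (q :: P') = pvNear xs := by rw [← hP, ih (i + 1)]
        have h3 : (q - i < 6) ↔ (q < i + 6) := by omega
        simp [pvPosFrom, pvAnyClose, pvNear, hx, hP, h2, h1, h3]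
    · simp [pvPosFrom, pvNear, hx, ih (i + 1)]

-- one-step unfoldings (plain rfl; avoid simp looping on the recursive definitions)
theorem pvLoopB_cons (lst : List Int) (i x : Int) (rest : List (Int × Int)) :
    pvLoopB lst ((i, x) :: rest)
      = if x == 1 && (PySem.List.slice lst (some (i + 1)) (some (i + 6))).contains 1 then "NO"
        else pvLoopB lst rest := rfl

theorem pvNear_cons (x : Int) (xs : List Int) :
    pvNear (x :: xs) = ((x == 1 && (xs.take 5).contains 1) || pvNear xs) := rfl

-- B's loop over the enumeration of a suffix decides the local-window predicate on that suffix.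
theorem pvLoopB_eq (lst : List Int) : ∀ (ys : List Int) (i : Nat), lst.drop i = ys →
    pvLoopB lst (pvEnumFrom (i : Int) ys) = if pvNear ys then "NO" else "YES" := by
  intro ys
  induction ys with
  | nil => intro i _; rfl
  | cons x ys' ih =>
    intro i hdrop
    have hdrop' : lst.drop (i + 1) = ys' := by
      have := congrArg List.tail hdrop
      simpa [List.tail_drop] using this
    have e1 : ((i : Int) + 1) = ((i + 1 : Nat) : Int) := by norm_cast
    have e6 : ((i : Int) + 6) = ((i + 6 : Nat) : Int) := by norm_cast
    have hslice : PySem.List.slice lst (some ((i : Int) + 1)) (some ((i : Int) + 6))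
        = ys'.take 5 := by
      have h := PySem.List.slice_natCast lst (i + 1) (i + 6)
      rw [hdrop'] at h
      rw [e1, e6, h, show (i + 6) - (i + 1) = 5 from by omega]
    have hrec := ih (i + 1) hdrop'
    rw [show pvEnumFrom (i : Int) (x :: ys') = ((i : Int), x) :: pvEnumFrom ((i : Int) + 1) ys'
        from rfl,
      pvLoopB_cons, hslice, pvNear_cons]
    by_cases hb : (x == 1 && (ys'.take 5).contains 1) = true
    · rw [if_pos hb]
      have hp : x = 1 ∧ 1 ∈ List.take 5 ys' := by simpa using hb
      simp
      exact fun h => absurd hp.2 (h hp.1)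
    · have hb' : (x == 1 && (ys'.take 5).contains 1) = false := by simpa using hb
      rw [if_neg hb, e1, hrec, hb']
      simp

-- ===== VERDICT (by name: the statement is the Claim_ definition above) =====
theorem is_social_distance_spec : Claim_equal_is_social_distance := by
  intro n lst _
  unfold Spec_is_social_distance is_social_distance is_social_distance_alt
  rw [pvLoopA_start lst 0 le_rfl, anyClose_eq_near lst 0,
    show (0 : Int) = ((0 : Nat) : Int) by norm_num, pvLoopB_eq lst lst 0 (by simp)]
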